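-- pv_equiv track=rewrite | github.com/muzafferarikan/gNOMO2 | workflow/scripts/unipept_get_peptinfo.py | generateGetRequest
-- ===== SOURCE A (Python) =====
-- def generateGetRequest(peptides):
--
--     """
--     Given a list of Unipept peptides, it generates a list of Unipept Get Requests
--     :param peptides: Unipept peptides
--     :return: list of get requests for Unipept
--     """
--
--     request_list = list()
--
--     char_count = 74  # number of chars minimum per request
--     request = "http://api.unipept.ugent.be/api/v1/peptinfo.json?"
--     for peptide in peptides:
--         if (len(peptide) + 9 + char_count) < 2048:
--             request += "input[]={}&".format(peptide)
--             char_count += 9 + len(peptide)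
--         else:
--             request += "equate_il=true&extra=true&names=true"
--             request_list.append(request)
--             request = "http://api.unipept.ugent.be/api/v1/peptinfo.json?" + "input[]={}&".format(peptide)
--             char_count = 74 + 9 + len(peptide)
--     if len(request) != 49:  # first part of request
--         request += "equate_il=true&extra=true"
--         request_list.append(request)
--
--     return request_list
-- ===== SOURCE B (Python) =====
-- def generateGetRequest(peptides):
--     """
--     Given a list of Unipept peptides, it generates a list of Unipept Get Requests
--     :param peptides: Unipept peptides
--     :return: list of get requests for Unipept
--     """
--     base = "http://api.unipept.ugent.be/api/v1/peptinfo.json?"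
--     # Phase 1: group the peptides by the running character budget.
--     groups = []
--     current = []
--     char_count = 74
--     for peptide in peptides:
--         if char_count + 9 + len(peptide) < 2048:
--             current.append(peptide)
--             char_count += 9 + len(peptide)
--         else:
--             groups.append(current)
--             current = [peptide]
--             char_count = 74 + 9 + len(peptide)
--     if current:
--         groups.append(current)
--     # Phase 2: render each group; only the last request omits "&names=true".
--     if not groups:
--         return []
--     body = lambda group: base + "".join("input[]={}&".format(p) for p in group)
--     return [body(g) + "equate_il=true&extra=true&names=true" for g in groups[:-1]] + \
--            [body(groups[-1]) + "equate_il=true&extra=true"]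
-- ===== Notes on version B (the rewrite author's own statement) =====
-- stated objective: simpler
-- what changed: A builds each request string while scanning, interleaving URL construction with batching in one stateful loop; B first partitions the peptides into batches by the running character budget and then renders every batch into a URL in a separate pass (all but the last with &names=true).
import Mathlib
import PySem

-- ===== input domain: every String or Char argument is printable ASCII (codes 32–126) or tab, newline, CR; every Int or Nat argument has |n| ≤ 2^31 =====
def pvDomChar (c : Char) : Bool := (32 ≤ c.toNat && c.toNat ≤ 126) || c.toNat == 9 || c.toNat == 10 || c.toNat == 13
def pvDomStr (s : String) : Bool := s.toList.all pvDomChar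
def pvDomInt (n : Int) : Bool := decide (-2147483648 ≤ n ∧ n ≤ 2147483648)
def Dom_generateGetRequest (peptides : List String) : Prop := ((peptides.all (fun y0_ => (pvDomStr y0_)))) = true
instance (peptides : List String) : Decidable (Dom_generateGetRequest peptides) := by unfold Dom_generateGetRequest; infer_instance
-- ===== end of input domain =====

-- B re-decomposes A's single stateful loop into a grouping pass followed by a rendering pass (objective: simpler); return values proved equal on all inputs.

-- literal string fragments shared by both Pythons
def pvBase : List Char := "http://api.unipept.ugent.be/api/v1/peptinfo.json?".toList
def pvItem (p : String) : List Char := "input[]=".toList ++ p.toList ++ "&".toList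
def pvNames : List Char := "equate_il=true&extra=true&names=true".toList
def pvPlain : List Char := "equate_il=true&extra=true".toList

-- ===== PORT A =====
-- A's loop body: state = (request_list, request as List Char, char_count)
def pvStepA (st : List String × List Char × Int) (p : String) : List String × List Char × Int :=
  match st with
  | (reqList, req, cnt) =>
    if PySem.Str.len p + 9 + cnt < 2048 then
      (reqList, req ++ pvItem p, cnt + (9 + PySem.Str.len p))
    else
      (reqList ++ [String.ofList (req ++ pvNames)], pvBase ++ pvItem p, 74 + (9 + PySem.Str.len p))

def generateGetRequest (peptides : List String) : List String :=
  match peptides.foldl pvStepA ([], pvBase, 74) with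
  | (reqList, req, _) =>
    if (req.length : Int) ≠ 49 then reqList ++ [String.ofList (req ++ pvPlain)] else reqList

-- ===== PORT B =====
-- phase 1: grouping; state = (groups, current, char_count)
def pvStepB (st : List (List String) × List String × Int) (p : String) :
    List (List String) × List String × Int :=
  match st with
  | (groups, cur, cnt) =>
    if cnt + 9 + PySem.Str.len p < 2048 then
      (groups, cur ++ [p], cnt + (9 + PySem.Str.len p))
    else
      (groups ++ [cur], [p], 74 + (9 + PySem.Str.len p))

-- `body(group)` of Source B: base + "".join of the formatted items
def pvBody (g : List String) : List Char := pvBase ++ g.flatMap pvItem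

-- phase 2: rendering ("if not groups: return []", then groups[:-1] with names, groups[-1] without)
def pvRender (groups : List (List String)) : List String :=
  match groups with
  | [] => []
  | g :: gs =>
      ((g :: gs).dropLast).map (fun h => String.ofList (pvBody h ++ pvNames)) ++
        [String.ofList (pvBody ((g :: gs).getLast (List.cons_ne_nil g gs)) ++ pvPlain)]

def generateGetRequest_alt (peptides : List String) : List String :=
  match peptides.foldl pvStepB ([], [], 74) with
  | (groups, cur, _) =>
    pvRender (if cur ≠ [] then groups ++ [cur] else groups)

-- ===== PRECONDITION & SPEC =====
def Spec_generateGetRequest (peptides : List String) (out : List String) : Prop := out = generateGetRequest_alt peptides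
instance (peptides : List String) (out : List String) : Decidable (Spec_generateGetRequest peptides out) := by unfold Spec_generateGetRequest; infer_instance

-- ===== CLAIM (what is proved, stated in full; the proofs are below) =====
def Claim_equal_generateGetRequest : Prop := ∀ (peptides : List String), Dom_generateGetRequest peptides → Spec_generateGetRequest peptides (generateGetRequest peptides)

-- ===== LEMMAS AND PROOFS =====

-- cost of a group = total characters its items contribute (9 + len p each)
def pvCost (g : List String) : Int := ((g.flatMap pvItem).length : Int)

lemma pvItem_length (p : String) : ((pvItem p).length : Int) = 9 + PySem.Str.len p := by
  unfold pvItem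
  simp [PySem.Str.len_eq, List.length_append]
  omega

lemma pvCost_nil : pvCost [] = 0 := rfl

lemma pvCost_concat (g : List String) (p : String) :
    pvCost (g ++ [p]) = pvCost g + (9 + PySem.Str.len p) := by
  unfold pvCost
  rw [List.flatMap_append]
  simp only [List.flatMap_cons, List.flatMap_nil, List.append_nil, List.length_append]
  push_cast
  rw [pvItem_length]

-- abstraction: B's grouping state seen through A's eyes
def pvRel (groups : List (List String)) (cur : List String) : List String × List Char × Int :=
  (groups.map (fun h => String.ofList (pvBody h ++ pvNames)), pvBase ++ cur.flatMap pvItem, 74 + pvCost cur)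

-- main simulation lemma: A's fold is B's fold through pvRel
lemma pv_sim (ps : List String) : ∀ (groups : List (List String)) (cur : List String),
    ps.foldl pvStepA (pvRel groups cur) =
      pvRel (ps.foldl pvStepB (groups, cur, 74 + pvCost cur)).1
            (ps.foldl pvStepB (groups, cur, 74 + pvCost cur)).2.1 := by
  induction ps with
  | nil => intro groups cur; rfl
  | cons p ps ih =>
    intro groups cur
    by_cases h : (74 + pvCost cur) + 9 + PySem.Str.len p < 2048
    · have hA : PySem.Str.len p + 9 + (74 + pvCost cur) < 2048 := by omega
      simp only [List.foldl_cons, pvStepA, pvStepB, pvRel, if_pos h, if_pos hA]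
      have : (74 + pvCost cur) + (9 + PySem.Str.len p) = 74 + pvCost (cur ++ [p]) := by
        rw [pvCost_concat]; ring
      rw [this]
      have := ih groups (cur ++ [p])
      simpa [pvRel, pvBody, List.flatMap_append] using this
    · have hA : ¬ PySem.Str.len p + 9 + (74 + pvCost cur) < 2048 := by omega
      simp only [List.foldl_cons, pvStepA, pvStepB, pvRel, if_neg h, if_neg hA]
      have h74 : (74 : Int) + (9 + PySem.Str.len p) = 74 + pvCost [p] := by
        rw [show ([p] : List String) = [] ++ [p] by simp, pvCost_concat, pvCost_nil]; ring
      rw [h74]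
      have := ih (groups ++ [cur]) [p]
      simpa [pvRel, pvBody, List.flatMap_append] using this

-- B's grouping fold never ends with an empty current group unless it never ran
lemma pv_cur_ne_nil (ps : List String) : ∀ (st : List (List String) × List String × Int),
    st.2.1 ≠ [] → (ps.foldl pvStepB st).2.1 ≠ [] := by
  induction ps with
  | nil => intro st h; exact h
  | cons p ps ih =>
    intro st h
    rw [List.foldl_cons]
    apply ih
    rcases st with ⟨groups, cur, cnt⟩
    simp only [pvStepB]
    split <;> simp

-- rendering of a nonempty group list, in closed form
lemma pvRender_eq (groups : List (List String)) (h : groups ≠ []) :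
    pvRender groups =
      (groups.dropLast).map (fun g => String.ofList (pvBody g ++ pvNames)) ++
        [String.ofList (pvBody (groups.getLast h) ++ pvPlain)] := by
  cases groups with
  | nil => exact absurd rfl h
  | cons g gs => rfl

lemma pvItem_ne_nil (p : String) : pvItem p ≠ [] := by simp [pvItem]

-- ===== VERDICT (by name: the statement is the Claim_ definition above) =====
theorem generateGetRequest_spec : Claim_equal_generateGetRequest := by
  intro peptides _
  unfold Spec_generateGetRequest generateGetRequest generateGetRequest_alt
  cases peptides with
  | nil => rfl
  | cons p ps =>
    have h0 : pvRel [] [] = (([] : List String), pvBase, (74 : Int)) := by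
      simp [pvRel, pvCost]
    have hsim := pv_sim (p :: ps) [] []
    rw [show (74 : Int) + pvCost [] = 74 by simp [pvCost_nil]] at hsim
    rw [h0] at hsim
    set st := (p :: ps).foldl pvStepB ([], [], 74) with hst
    obtain ⟨G, C, K⟩ := st
    have hC : C ≠ [] := by
      have := pv_cur_ne_nil ps (pvStepB ([], [], 74) p) (by simp only [pvStepB]; split <;> simp)
      rw [List.foldl_cons] at hst
      have h2 : ((ps.foldl pvStepB (pvStepB ([], [], 74) p))).2.1 = C := by rw [← hst]
      rw [h2] at this; exact this
    simp only at hsim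
    rw [hsim]
    simp only [pvRel]
    rw [if_pos hC, pvRender_eq (G ++ [C]) (by simp)]
    rw [List.dropLast_concat, List.getLast_concat]
    have hpos : 0 < (C.flatMap pvItem).length := by
      cases C with
      | nil => exact absurd rfl hC
      | cons q qs =>
        have h1 : (pvItem q).length ≠ 0 := by simpa using pvItem_ne_nil q
        simp only [List.flatMap_cons, List.length_append]
        omega
    have hlen : ((pvBase ++ C.flatMap pvItem).length : Int) ≠ 49 := by
      rw [List.length_append]
      have hb : pvBase.length = 49 := rfl
      push_cast
      omega
    rw [if_pos hlen]
    simp [pvBody]
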